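-- pv_equiv track=rewrite | github.com/kuruteiru/pycryptor | ciphers/text_formatter.py | format_repeating_chars
-- ===== SOURCE A (Python) =====
-- def format_repeating_chars(input_text: str) -> str:
--     if len(input_text) < 2: return input_text
--
--     result: list[str] = []
--     for i in range(len(input_text)):
--         result.append(input_text[i])
--         if i < len(input_text) - 1 and input_text[i] == input_text[i+1]:
--             sub_char: str = 'x' if input_text[i] != 'x' else 'q'
--             result.append(sub_char)
--
--     return ''.join(result)
-- ===== SOURCE B (Python) =====
-- def format_repeating_chars(input_text: str) -> str:
--     # Phase 1: run-length encode the string into maximal runs [char, count].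
--     runs = []
--     for c in input_text:
--         if runs and runs[-1][0] == c:
--             runs[-1][1] += 1
--         else:
--             runs.append([c, 1])
--     # Phase 2: a run of n equal chars needs n-1 separators, one after each
--     # char but the last; emit it by string multiplication.
--     return ''.join((c + ('q' if c == 'x' else 'x')) * (n - 1) + c for c, n in runs)
-- ===== Notes on version B (the rewrite author's own statement) =====
-- stated objective: alternative
-- what changed: Replaced the index-with-lookahead scan by a two-phase run-length encoding: first group the string into maximal runs (char,count), then emit each run in closed form as (char+separator)*(count-1)+char.
import Mathlib
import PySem

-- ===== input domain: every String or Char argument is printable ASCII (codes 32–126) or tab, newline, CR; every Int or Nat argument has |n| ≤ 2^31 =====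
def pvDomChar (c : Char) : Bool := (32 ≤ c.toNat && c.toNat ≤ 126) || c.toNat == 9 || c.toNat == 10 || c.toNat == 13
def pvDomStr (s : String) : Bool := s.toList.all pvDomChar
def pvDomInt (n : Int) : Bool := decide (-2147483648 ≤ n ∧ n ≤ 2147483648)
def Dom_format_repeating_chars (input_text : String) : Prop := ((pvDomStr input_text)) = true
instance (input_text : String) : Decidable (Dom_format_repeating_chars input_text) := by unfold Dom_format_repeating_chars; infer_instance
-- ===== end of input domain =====

-- B replaces A's index-with-lookahead scan by a two-phase run-length encoding
-- (group into maximal runs, then emit each run in closed form); objective: alternative, same O(n) cost.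

-- ===== PORT A =====
-- literal transliteration of A's index loop over range(len(input_text))
def format_repeating_chars (input_text : String) : String :=
  if PySem.Str.len input_text < 2 then input_text
  else
    String.ofList ((PySem.List.pyRange 0 (PySem.Str.len input_text) 1).foldl (fun r i =>
      let r := r ++ [PySem.List.pyGetD input_text.toList i ' ']
      if i < PySem.Str.len input_text - 1 ∧
          PySem.List.pyGetD input_text.toList i ' ' = PySem.List.pyGetD input_text.toList (i + 1) ' ' then
        r ++ [if PySem.List.pyGetD input_text.toList i ' ' ≠ 'x' then 'x' else 'q']
      else r) [])

-- ===== PORT B =====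
-- B's loop body: `runs[-1][1] += 1` if the last run has this char, else append a new run.
def pvRcBump : List (Char × Nat) → Char → List (Char × Nat)
  | [], c => [(c, 1)]
  | [(a, n)], c => if a = c then [(a, n + 1)] else [(a, n), (c, 1)]
  | r :: rest, c => r :: pvRcBump rest c

-- B's phase-2 emission of one run: (c + sep) * (n - 1) + c
def pvRcEmit (p : Char × Nat) : List Char :=
  (List.replicate (p.2 - 1) [p.1, if p.1 = 'x' then 'q' else 'x']).flatten ++ [p.1]

-- literal transliteration of B: run-length encode, then join the per-run emissions
def format_repeating_chars_alt (input_text : String) : String :=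
  String.ofList ((input_text.toList.foldl pvRcBump []).flatMap pvRcEmit)

-- ===== PRECONDITION & SPEC =====
def Spec_format_repeating_chars (input_text : String) (out : String) : Prop := out = format_repeating_chars_alt input_text
instance (input_text : String) (out : String) : Decidable (Spec_format_repeating_chars input_text out) := by unfold Spec_format_repeating_chars; infer_instance

-- ===== CLAIM (what is proved, stated in full; the proofs are below) =====
def Claim_equal_format_repeating_chars : Prop := ∀ (input_text : String), Dom_format_repeating_chars input_text → Spec_format_repeating_chars input_text (format_repeating_chars input_text)

-- ===== LEMMAS AND PROOFS =====

-- common recursive characterisation of both programs' output (on char lists)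
def pvGo : List Char → List Char
  | [] => []
  | [a] => [a]
  | a :: b :: rest =>
    (if a = b then [a, if a ≠ 'x' then 'x' else 'q'] else [a]) ++ pvGo (b :: rest)

-- ---- B-side: run-length fold equals pvGo ----

theorem pvRcBump_ne_nil (rs : List (Char × Nat)) (c : Char) : pvRcBump rs c ≠ [] := by
  match rs with
  | [] => simp [pvRcBump]
  | [(a, n)] => simp only [pvRcBump]; split_ifs <;> simp
  | r :: x :: rest => simp [pvRcBump]

theorem pvRcBump_append (rs rs' : List (Char × Nat)) (c : Char) (h : rs' ≠ []) :
    pvRcBump (rs ++ rs') c = rs ++ pvRcBump rs' c := by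
  induction rs with
  | nil => simp
  | cons r rest ih =>
    have : rest ++ rs' ≠ [] := by simp [h]
    match htl : rest ++ rs', this with
    | x :: xs, _ =>
      simp only [List.cons_append, htl, pvRcBump]
      rw [← htl, ih]

theorem pvRcFold_append (cs : List Char) (rs rs' : List (Char × Nat)) (h : rs' ≠ []) :
    cs.foldl pvRcBump (rs ++ rs') = rs ++ cs.foldl pvRcBump rs' := by
  induction cs generalizing rs' with
  | nil => simp
  | cons c cs ih =>
    simp only [List.foldl_cons]
    rw [pvRcBump_append rs rs' c h, ih _ (pvRcBump_ne_nil rs' c)]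

theorem pvRcMain (cs : List Char) (a : Char) (n : Nat) :
    (cs.foldl pvRcBump [(a, n + 1)]).flatMap pvRcEmit
      = (List.replicate n [a, if a = 'x' then 'q' else 'x']).flatten ++ pvGo (a :: cs) := by
  induction cs generalizing a n with
  | nil => simp [pvRcEmit, pvGo]
  | cons c cs ih =>
    by_cases hac : a = c
    · subst hac
      simp only [List.foldl_cons, pvRcBump, if_true]
      rw [ih a (n + 1)]
      have : pvGo (a :: a :: cs) = [a, if a ≠ 'x' then 'x' else 'q'] ++ pvGo (a :: cs) := by
        simp [pvGo]
      rw [this, List.replicate_succ' (n := n), List.flatten_append]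
      have hsep : (if a = 'x' then 'q' else 'x') = (if a ≠ 'x' then 'x' else 'q') := by
        by_cases h : a = 'x' <;> simp [h]
      rw [hsep]
      simp only [List.flatten_cons, List.flatten_nil, List.append_nil, List.append_assoc]
    · simp only [List.foldl_cons, pvRcBump, if_neg hac]
      have : [(a, n + 1), (c, 1)] = [(a, n + 1)] ++ [(c, 1)] := rfl
      rw [this, pvRcFold_append cs [(a, n + 1)] [(c, 1)] (by simp)]
      rw [List.flatMap_append]
      have h1 : ([(a, n + 1)] : List (Char × Nat)).flatMap pvRcEmit
          = (List.replicate n [a, if a = 'x' then 'q' else 'x']).flatten ++ [a] := by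
        simp [pvRcEmit]
      rw [h1, ih c 0]
      have : pvGo (a :: c :: cs) = [a] ++ pvGo (c :: cs) := by
        simp [pvGo, hac]
      rw [this]
      simp
theorem pvB_eq_go (cs : List Char) :
    (cs.foldl pvRcBump []).flatMap pvRcEmit = pvGo cs := by
  cases cs with
  | nil => simp [pvGo]
  | cons a t =>
    simp only [List.foldl_cons, pvRcBump]
    have := pvRcMain t a 0
    simpa using this

-- ---- A-side: index loop equals pvGo ----

-- A's loop body as a pure append of a block
def pvBlock (cs : List Char) (n i : Int) : List Char :=
  [PySem.List.pyGetD cs i ' '] ++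
    (if i < n - 1 ∧ PySem.List.pyGetD cs i ' ' = PySem.List.pyGetD cs (i + 1) ' ' then
      [if PySem.List.pyGetD cs i ' ' ≠ 'x' then 'x' else 'q'] else [])

-- A's block at a natural index, in terms of List.getD
def pvBlockN (cs : List Char) (k : Nat) : List Char :=
  [cs.getD k ' '] ++
    (if k + 1 < cs.length ∧ cs.getD k ' ' = cs.getD (k + 1) ' ' then
      [if cs.getD k ' ' ≠ 'x' then 'x' else 'q'] else [])

theorem pvA_foldl_eq_flatMap (cs : List Char) (n : Int) (acc : List Char) :
    (PySem.List.pyRange 0 n 1).foldl (fun r i =>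
        let r := r ++ [PySem.List.pyGetD cs i ' ']
        if i < n - 1 ∧ PySem.List.pyGetD cs i ' ' = PySem.List.pyGetD cs (i + 1) ' ' then
          r ++ [if PySem.List.pyGetD cs i ' ' ≠ 'x' then 'x' else 'q']
        else r) acc
      = acc ++ (PySem.List.pyRange 0 n 1).flatMap (pvBlock cs n) := by
  have h : (fun (r : List Char) (i : Int) =>
        let r := r ++ [PySem.List.pyGetD cs i ' ']
        if i < n - 1 ∧ PySem.List.pyGetD cs i ' ' = PySem.List.pyGetD cs (i + 1) ' ' then
          r ++ [if PySem.List.pyGetD cs i ' ' ≠ 'x' then 'x' else 'q']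
        else r)
      = (fun r i => r ++ pvBlock cs n i) := by
    funext r i
    simp only [pvBlock]
    split_ifs <;> simp
  rw [h, PySem.List.foldl_append_eq_flatMap]

theorem pvBlock_nat (cs : List Char) (k : Nat) :
    pvBlock cs (cs.length : Int) (k : Int) = pvBlockN cs k := by
  simp only [pvBlock, pvBlockN]
  have h1 : ((k : Int) + 1) = ((k + 1 : Nat) : Int) := by push_cast; ring
  rw [h1]
  simp only [PySem.List.pyGetD_natCast]
  have h2 : ((k : Int) < (cs.length : Int) - 1) ↔ (k + 1 < cs.length) := by omega
  simp [h2]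

theorem pvBlockN_cons_succ (a : Char) (t : List Char) (k : Nat) :
    pvBlockN (a :: t) (k + 1) = pvBlockN t k := by
  simp only [pvBlockN, List.getD_cons_succ, List.length_cons]
  have h : (k + 1 + 1 < t.length + 1) ↔ (k + 1 < t.length) := by omega
  simp only [h]

theorem pvBlocksN_eq_go (cs : List Char) :
    (List.range cs.length).flatMap (pvBlockN cs) = pvGo cs := by
  induction cs with
  | nil => simp [pvGo]
  | cons a t ih =>
    rw [List.length_cons, List.range_succ_eq_map, List.flatMap_cons, List.flatMap_map]
    have hs : (List.range t.length).flatMap (fun k => pvBlockN (a :: t) (Nat.succ k))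
        = (List.range t.length).flatMap (pvBlockN t) := by
      apply List.flatMap_congr
      intro k _
      exact pvBlockN_cons_succ a t k
    rw [hs, ih]
    cases t with
    | nil => simp [pvBlockN, pvGo]
    | cons b rest =>
      simp only [pvBlockN, pvGo, List.getD_cons_zero, List.getD_cons_succ, List.length_cons]
      split_ifs with h1 h2 <;> simp_all

theorem pvA_eq_go (cs : List Char) :
    (PySem.List.pyRange 0 (cs.length : Int) 1).flatMap (pvBlock cs (cs.length : Int))
      = pvGo cs := by
  rw [PySem.List.pyRange_zero_natCast, List.flatMap_map, ← pvBlocksN_eq_go cs]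
  apply List.flatMap_congr
  intro k _
  exact pvBlock_nat cs k

-- ===== VERDICT (by name: the statement is the Claim_ definition above) =====
theorem format_repeating_chars_spec : Claim_equal_format_repeating_chars := by
  intro s _
  show format_repeating_chars s = format_repeating_chars_alt s
  have hB : format_repeating_chars_alt s = String.ofList (pvGo s.toList) := by
    unfold format_repeating_chars_alt
    rw [pvB_eq_go]
  rw [hB]
  unfold format_repeating_chars
  have hn : PySem.Str.len s = ((s.toList.length : Nat) : Int) := by
    simp [PySem.Str.len_eq, String.length_toList]
  rw [hn]
  split_ifs with h
  · have hlen : s.toList.length < 2 := by omega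
    match hcs : s.toList, hlen with
    | [], _ => rw [← String.ofList_toList (s := s), hcs]; rfl
    | [a], _ => rw [← String.ofList_toList (s := s), hcs]; rfl
  · rw [pvA_foldl_eq_flatMap, List.nil_append, pvA_eq_go]
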